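-- pv_equiv track=rewrite | github.com/GrootisAfk/BRACU | CSE422/24241277_shabab_abdullah_cse422_06_assignment02_fall2024.py | fit1
-- ===== SOURCE A (Python) =====
-- def fit1(chrm, N, T):
--     ovrlp_pen = 0
--     cons_pen = 0
--     crs_cnt = [0] * N
--
--     for t in range(T):
--         timeslot = chrm[t * N:(t + 1) * N]
--         schd_crs = sum(int(timeslot[i]) for i in range(len(timeslot)))
--         if schd_crs > 1:
--             ovrlp_pen += schd_crs - 1
--         for i in range(N):
--             if timeslot[i] == '1':
--                 crs_cnt[i] += 1
--
--     cons_pen += sum(abs(count - 1) for count in crs_cnt)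
--     tot_pen = ovrlp_pen + cons_pen
--     return -tot_pen
-- ===== SOURCE B (Python) =====
-- def fit1(chrm, N, T):
--     # Two separate passes: overlap per timeslot slice, assignment per course column
--     # via strided index arithmetic (no per-course counter array).
--     overlap = 0
--     for t in range(T):
--         slot = chrm[t * N:(t + 1) * N]
--         s = sum(int(c) for c in slot)
--         overlap += max(s - 1, 0)
--     assign = 0
--     for i in range(N):
--         cnt = 0
--         for j in range(i, N * T, N):
--             if chrm[j] == '1':
--                 cnt += 1
--         assign += abs(cnt - 1)
--     return -(overlap + assign)
-- ===== Notes on version B (the rewrite author's own statement) =====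
-- stated objective: alternative
-- what changed: B splits the single interleaved timeslot loop with its crs_cnt counter array into two independent passes: an overlap pass over timeslot slices and a per-course column count via strided index ranges (no counter array), combining the penalties at the end.
import Mathlib
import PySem

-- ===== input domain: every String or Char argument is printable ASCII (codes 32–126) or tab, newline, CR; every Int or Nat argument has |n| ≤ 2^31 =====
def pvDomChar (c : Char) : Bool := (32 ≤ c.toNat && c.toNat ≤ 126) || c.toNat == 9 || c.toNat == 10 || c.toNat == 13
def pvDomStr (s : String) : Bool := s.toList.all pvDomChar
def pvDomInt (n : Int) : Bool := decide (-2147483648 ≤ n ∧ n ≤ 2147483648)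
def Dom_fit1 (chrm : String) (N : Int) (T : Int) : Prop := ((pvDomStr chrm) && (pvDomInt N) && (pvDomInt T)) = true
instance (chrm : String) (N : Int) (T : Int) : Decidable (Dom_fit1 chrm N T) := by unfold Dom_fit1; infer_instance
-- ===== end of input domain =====

-- B recomputes the same fitness in two separate passes (overlap per timeslot slice,
-- assignment per course column by strided index arithmetic, no counter array): objective 'alternative'.

-- ===== PORT A =====
-- int(s) for the one-character string timeslot[i]; the .getD 0 default is unreachable under Pre_
-- (Python raises ValueError there, which Pre_fit1 excludes).
def pyIntChar (c : Char) : Int := (PySem.Int.ofChars? [c]).getD 0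

-- chrm[t*N:(t+1)*N]
def fit1Slot (cs : List Char) (N : Int) (t : Int) : List Char :=
  PySem.List.slice cs (some (t * N)) (some ((t + 1) * N))

-- the inner 'for i in range(N): if timeslot[i] == '1': crs_cnt[i] += 1' loop;
-- the pyGetD default ' ' and the i.toNat are unreachable/exact since i ranges over 0..N-1
-- and Pre_fit1 guarantees the slot has length N (Python raises IndexError otherwise).
def fit1Step (cs : List Char) (N : Int) (t : Int) (cc : List Int) : List Int :=
  (PySem.List.pyRange 0 N 1).foldl
    (fun cc i => if PySem.List.pyGetD (fit1Slot cs N t) i ' ' = '1' then cc.modify i.toNat (· + 1) else cc) cc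

def fit1 (chrm : String) (N : Int) (T : Int) : Int :=
  let cs := chrm.toList
  let st :=
    (PySem.List.pyRange 0 T 1).foldl
      (fun (st : Int × List Int) t =>
        (-- schd_crs = sum(int(timeslot[i]) for i in range(len(timeslot))); then the if
         (if (((PySem.List.pyRange 0 ((fit1Slot cs N t).length : Int) 1).map
                 (fun i => pyIntChar (PySem.List.pyGetD (fit1Slot cs N t) i ' '))).sum) > 1
          then st.1 + ((((PySem.List.pyRange 0 ((fit1Slot cs N t).length : Int) 1).map
                 (fun i => pyIntChar (PySem.List.pyGetD (fit1Slot cs N t) i ' '))).sum) - 1)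
          else st.1),
         fit1Step cs N t st.2))
      (0, List.replicate N.toNat 0);
  -(st.1 + (st.2.map (fun count => |count - 1|)).sum)

-- ===== PORT B =====
def fit1_alt (chrm : String) (N : Int) (T : Int) : Int :=
  let cs := chrm.toList
  let overlap :=
    (PySem.List.pyRange 0 T 1).foldl
      (fun acc t =>
        acc + max (((PySem.List.slice cs (some (t * N)) (some ((t + 1) * N))).map pyIntChar).sum - 1) 0) 0
  let assign :=
    (PySem.List.pyRange 0 N 1).foldl
      (fun acc i =>
        acc + |((PySem.List.pyRange i (N * T) N).foldl
                  (fun cnt j => if PySem.List.pyGetD cs j ' ' = '1' then cnt + 1 else cnt) 0) - 1|) 0;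
  -(overlap + assign)

-- ===== PRECONDITION & SPEC =====
-- Pre_fit1 holds exactly where the Python A returns normally: with N,T > 0 it needs the first
-- N*T characters to exist (else IndexError) and be digits (else ValueError in int()); with
-- N < 0 < T only the slice chrm[0:N] is read by int(), so those characters must be digits.
def Pre_fit1 (chrm : String) (N : Int) (T : Int) : Prop :=
  (0 < N ∧ 0 < T →
    N * T ≤ (chrm.toList.length : Int) ∧
      (chrm.toList.take (N * T).toNat).all (fun c => c.isDigit) = true) ∧
  (N < 0 ∧ 0 < T →
    (chrm.toList.take ((chrm.toList.length : Int) + N).toNat).all (fun c => c.isDigit) = true)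
instance (chrm : String) (N : Int) (T : Int) : Decidable (Pre_fit1 chrm N T) := by
  unfold Pre_fit1; infer_instance

def pvWitness_fit1 : String × Int × Int := ("10", 1, 2)

def Spec_fit1 (chrm : String) (N : Int) (T : Int) (out : Int) : Prop := out = fit1_alt chrm N T
instance (chrm : String) (N : Int) (T : Int) (out : Int) : Decidable (Spec_fit1 chrm N T out) := by
  unfold Spec_fit1; infer_instance

-- ===== CLAIM (what is proved, stated in full; the proofs are below) =====
def Claim_equal_fit1 : Prop := ∀ (chrm : String) (N : Int) (T : Int), Dom_fit1 chrm N T → Pre_fit1 chrm N T → Spec_fit1 chrm N T (fit1 chrm N T)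

-- ===== LEMMAS AND PROOFS =====

-- generic: effect of the range-fold of conditional modify, elementwise
lemma foldl_modify_getElem? (p : Nat → Bool) :
    ∀ (m : Nat) (cc : List Int) (j : Nat),
      ((List.range m).foldl (fun cc i => if p i then cc.modify i (· + 1) else cc) cc)[j]? =
        (fun v => v + if j < m ∧ p j then 1 else 0) <$> cc[j]? := by
  intro m
  induction m with
  | zero => intro cc j; simp
  | succ m ih =>
    intro cc j
    rw [List.range_succ, List.foldl_append]
    simp only [List.foldl_cons, List.foldl_nil]
    by_cases hjm : j = m
    · subst hjm
      by_cases hp : p j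
      · rw [if_pos hp, List.getElem?_modify, ih]
        cases hcc : cc[j]? with
        | none => simp
        | some v => simp [hp]
      · rw [if_neg hp, ih]
        cases hcc : cc[j]? with
        | none => simp
        | some v => simp [hp]
    · have hiff : ((j < m ∧ p j) ↔ (j < m + 1 ∧ p j)) := by
        constructor
        · rintro ⟨h1, h2⟩; exact ⟨Nat.lt_succ_of_lt h1, h2⟩
        · rintro ⟨h1, h2⟩; exact ⟨by omega, h2⟩
      have hite : (if j < m ∧ p j then (1:Int) else 0) = (if j < m + 1 ∧ p j then 1 else 0) :=
        if_congr hiff rfl rfl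
      by_cases hp : p m
      · rw [if_pos hp, List.getElem?_modify, ih]
        cases hcc : cc[j]? with
        | none => simp
        | some v => simp [Ne.symm hjm, hite]
      · rw [if_neg hp, ih, hite]

-- the slot, at a valid position, is just cs at the strided index
lemma slot_getElem? (cs : List Char) (n : Nat) (a : Nat) (k : Nat) (hk : k < n) :
    (fit1Slot cs (n : Int) (a : Int))[k]? = cs[a * n + k]? := by
  unfold fit1Slot
  have h1 : ((a : Int) * n) = ((a * n : Nat) : Int) := by push_cast; ring
  have h2 : (((a : Int) + 1) * n) = (((a * n + n : Nat)) : Int) := by push_cast; ring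
  rw [h1, h2, PySem.List.slice_natCast]
  have h3 : a * n + n - a * n = n := by omega
  rw [h3, List.getElem?_take_of_lt hk, List.getElem?_drop]

-- one timeslot of A's counter loop, on the canonical map form of the counter list
lemma fit1Step_map (cs : List Char) (n : Nat) (a : Nat)
    (hlen : (a + 1) * n ≤ cs.length) (f : Nat → Int) :
    fit1Step cs (n : Int) (a : Int) ((List.range n).map f) =
      (List.range n).map (fun i => f i + if cs[a * n + i]? == some '1' then 1 else 0) := by
  unfold fit1Step
  rw [PySem.List.pyRange_zero_nat, List.foldl_map]
  have hbody : ∀ (cc : List Int), ∀ k ∈ List.range n,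
      (if PySem.List.pyGetD (fit1Slot cs (n : Int) (a : Int)) ((k : Nat) : Int) ' ' = '1'
       then cc.modify ((k : Nat) : Int).toNat (· + 1) else cc) =
      (if (cs[a * n + k]? == some '1' : Bool) then cc.modify k (· + 1) else cc) := by
    intro cc k hk
    have hk' : k < n := List.mem_range.mp hk
    have hidx : a * n + k < cs.length := by
      have : a * n + k < (a + 1) * n := by nlinarith
      omega
    have hcond : (PySem.List.pyGetD (fit1Slot cs (n : Int) (a : Int)) ((k : Nat) : Int) ' ' = '1')
        ↔ ((cs[a * n + k]? == some '1') = true) := by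
      rw [PySem.List.pyGetD_natCast]
      rw [List.getD_eq_getElem?_getD, slot_getElem? cs n a k hk']
      rw [List.getElem?_eq_getElem hidx]
      simp
    rw [Int.toNat_natCast]
    by_cases h : (cs[a * n + k]? == some '1') = true
    · rw [if_pos (hcond.mpr h), if_pos h]
    · rw [if_neg (fun hc => h (hcond.mp hc)), if_neg h]
  rw [PySem.List.foldl_congr_mem (List.range n) _
        (fun cc k => if (cs[a * n + k]? == some '1' : Bool) then cc.modify k (· + 1) else cc) _ hbody]
  apply List.ext_getElem?
  intro j
  rw [foldl_modify_getElem? (fun k => cs[a * n + k]? == some '1') n _ j]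
  by_cases hj : j < n
  · rw [List.getElem?_map, List.getElem?_map, List.getElem?_range hj]
    simp [hj]
  · have h1 : ((List.range n).map f)[j]? = none := by
      simp; omega
    have h2 : ((List.range n).map (fun i => f i + if cs[a * n + i]? == some '1' then 1 else 0))[j]? = none := by
      simp; omega
    rw [h1, h2]; rfl

-- A's whole counter loop: crs_cnt[i] counts the '1's in column i
lemma fit1_crs (cs : List Char) (n : Nat) (hn : 0 < n) :
    ∀ (tt : Nat), tt * n ≤ cs.length →
      ((PySem.List.pyRange 0 (tt : Int) 1).foldl (fun cc t => fit1Step cs (n : Int) t cc)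
          (List.replicate n 0)) =
        (List.range n).map
          (fun i => ((List.range tt).countP (fun k => cs[k * n + i]? == some '1') : Int)) := by
  intro tt
  induction tt with
  | zero =>
    intro _
    rw [Nat.cast_zero, PySem.List.pyRange_one_eq_nil le_rfl]
    simp [List.foldl_nil]
  | succ tt ih =>
    intro hlen
    have hlen' : tt * n ≤ cs.length := by nlinarith
    have hcast : ((tt + 1 : Nat) : Int) = (tt : Int) + 1 := by push_cast; ring
    rw [hcast, PySem.List.pyRange_one_succ_right (by positivity), List.foldl_append]
    rw [ih hlen']
    simp only [List.foldl_cons, List.foldl_nil]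
    rw [fit1Step_map cs n tt (by omega)]
    apply List.map_congr_left
    intro i hi
    rw [List.range_succ, List.countP_append]
    simp only [List.countP_cons, List.countP_nil]
    push_cast
    by_cases h : (cs[tt * n + i]? == some '1') = true <;> simp [h]

-- B's strided column loop computes the same column count
lemma fit1_alt_col (cs : List Char) (n : Nat) (hn : 0 < n) (T : Int) (hT : 0 < T)
    (hlen : (n : Int) * T ≤ (cs.length : Int)) (i : Nat) (hi : i < n) :
    (PySem.List.pyRange (i : Int) ((n : Int) * T) (n : Int)).foldl
        (fun cnt j => if PySem.List.pyGetD cs j ' ' = '1' then cnt + 1 else cnt) 0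
      = ((List.range T.toNat).countP (fun k => cs[k * n + i]? == some '1') : Int) := by
  have hnpos : (0 : Int) < (n : Int) := by exact_mod_cast hn
  have hiT : (i : Int) < (n : Int) * T := by nlinarith
  rw [PySem.List.pyRange_of_pos _ _ hnpos, if_pos hiT]
  have hq : ((n : Int) * T - i + n - 1) / n = T := by
    rw [← PySem.Int.floordiv_eq_ediv_of_pos hnpos,
        PySem.Int.floordiv_eq_iff_of_pos hnpos]
    constructor <;> nlinarith
  rw [hq, List.foldl_map, PySem.List.foldl_ite_add_one
        (fun (k : Nat) => PySem.List.pyGetD cs ((i : Int) + (n : Int) * (k : Int)) ' ' = '1')]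
  rw [zero_add, Int.natCast_inj]
  apply List.countP_congr
  intro k hk
  have hk' : k < T.toNat := List.mem_range.mp hk
  have hm : i + n * k < cs.length := by
    have h1 : (1 : Int) + k ≤ T := by omega
    have : ((i + n * k : Nat) : Int) < (n : Int) * T := by push_cast; nlinarith
    omega
  have hidx : ((i : Int) + (n : Int) * (k : Int)) = ((i + n * k : Nat) : Int) := by push_cast; ring
  rw [hidx]
  simp only [decide_eq_true_eq, PySem.List.pyGetD_natCast, List.getD_eq_getElem?_getD]
  have hcomm : i + n * k = k * n + i := by ring
  rw [hcomm] at hm ⊢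
  rw [List.getElem?_eq_getElem hm]
  simp

-- the two overlap loops agree (index-sum vs direct sum, if vs max)
lemma ov_eq (cs : List Char) (N T : Int) :
    (PySem.List.pyRange 0 T 1).foldl
      (fun acc t =>
        if (((PySem.List.pyRange 0 ((fit1Slot cs N t).length : Int) 1).map
              (fun i => pyIntChar (PySem.List.pyGetD (fit1Slot cs N t) i ' '))).sum) > 1
        then acc + ((((PySem.List.pyRange 0 ((fit1Slot cs N t).length : Int) 1).map
              (fun i => pyIntChar (PySem.List.pyGetD (fit1Slot cs N t) i ' '))).sum) - 1)
        else acc) 0 =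
    (PySem.List.pyRange 0 T 1).foldl
      (fun acc t =>
        acc + max (((PySem.List.slice cs (some (t * N)) (some ((t + 1) * N))).map pyIntChar).sum - 1) 0) 0 := by
  apply PySem.List.foldl_congr_mem
  intro acc t _
  have hmap : (PySem.List.pyRange 0 ((fit1Slot cs N t).length : Int) 1).map
      (fun i => pyIntChar (PySem.List.pyGetD (fit1Slot cs N t) i ' ')) =
      (fit1Slot cs N t).map pyIntChar := by
    rw [show (fun i => pyIntChar (PySem.List.pyGetD (fit1Slot cs N t) i ' ')) =
          pyIntChar ∘ (fun j => PySem.List.pyGetD (fit1Slot cs N t) j ' ') from rfl]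
    rw [← List.map_map, PySem.List.map_pyGetD_pyRange_zero']
  rw [hmap]
  show _ = acc + max (((fit1Slot cs N t).map pyIntChar).sum - 1) 0
  split_ifs with h <;> omega

-- the counter-array penalty equals B's column-wise penalty
lemma cons_eq (cs : List Char) (N T : Int)
    (hpre : 0 < N → 0 < T → N * T ≤ (cs.length : Int)) :
    (((PySem.List.pyRange 0 T 1).foldl (fun cc t => fit1Step cs N t cc)
        (List.replicate N.toNat 0)).map (fun count => |count - 1|)).sum =
    (PySem.List.pyRange 0 N 1).foldl
      (fun acc i =>
        acc + |((PySem.List.pyRange i (N * T) N).foldl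
                  (fun cnt j => if PySem.List.pyGetD cs j ' ' = '1' then cnt + 1 else cnt) 0) - 1|) 0 := by
  rcases le_or_gt N 0 with hN | hN
  · -- no courses: both sides are 0
    have hr : PySem.List.pyRange 0 N 1 = [] := PySem.List.pyRange_one_eq_nil hN
    have hstep : ∀ (cc : List Int) (t : Int), fit1Step cs N t cc = cc := by
      intro cc t; unfold fit1Step; rw [hr]; rfl
    rw [hr, List.foldl_nil]
    rw [PySem.List.foldl_congr_mem _ _ (fun cc _ => cc) _
          (fun cc t _ => hstep cc t)]
    rw [List.foldl_fixed, Int.toNat_of_nonpos hN]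
    simp
  · have hn : 0 < N.toNat := by omega
    have hNn : N = (N.toNat : Int) := (Int.toNat_of_nonneg hN.le).symm
    rcases le_or_gt T 0 with hT | hT
    · -- no timeslots: every count is 0, every penalty term is 1
      rw [PySem.List.pyRange_one_eq_nil hT, List.foldl_nil]
      rw [List.map_replicate, List.sum_replicate]
      have hNT : N * T ≤ 0 := mul_nonpos_of_nonneg_of_nonpos hN.le hT
      rw [PySem.List.foldl_congr_mem _ _ (fun acc _ => acc + 1) _ ?ptw]
      case ptw =>
        intro acc i hi
        have hi' := (PySem.List.mem_pyRange_one.mp hi).1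
        have : ¬ ((i : Int) < N * T) := by omega
        rw [PySem.List.pyRange_of_pos _ _ hN, if_neg this]
        simp
      rw [PySem.List.foldl_add _ (fun _ => (1 : Int))]
      rw [PySem.List.sum_map_const_int, PySem.List.length_pyRange_one]
      simp
    · -- main case
      have hlen : T.toNat * N.toNat ≤ cs.length := by
        have := hpre hN hT
        have h2 : ((T.toNat * N.toNat : Nat) : Int) ≤ (cs.length : Int) := by
          push_cast
          rw [← Int.toNat_of_nonneg hN.le, ← Int.toNat_of_nonneg hT.le] at this
          linarith
        exact_mod_cast h2
      have hTn : T = (T.toNat : Int) := (Int.toNat_of_nonneg hT.le).symm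
      rw [hNn, hTn]
      simp only [Int.toNat_natCast]
      rw [fit1_crs cs N.toNat hn T.toNat hlen]
      rw [List.map_map]
      rw [PySem.List.pyRange_zero_nat, List.foldl_map]
      rw [PySem.List.foldl_add _
            (fun (i : Nat) =>
              |((PySem.List.pyRange (i : Int) ((N.toNat : Int) * (T.toNat : Int)) (N.toNat : Int)).foldl
                  (fun cnt j => if PySem.List.pyGetD cs j ' ' = '1' then cnt + 1 else cnt) 0) - 1|)]
      rw [zero_add]
      congr 1
      apply List.map_congr_left
      intro i hi
      have hi' : i < N.toNat := List.mem_range.mp hi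
      have hlen' : ((N.toNat : Int)) * (T.toNat : Int) ≤ (cs.length : Int) := by
        have h := (Nat.cast_le (α := Int)).mpr hlen
        push_cast at h
        linarith
      have hTpos : (0 : Int) < (T.toNat : Int) := by omega
      rw [fit1_alt_col cs N.toNat hn (T.toNat : Int) hTpos hlen' i hi']
      simp only [Int.toNat_natCast, Function.comp_apply]

theorem fit1_eq_alt (chrm : String) (N T : Int) (hpre : Pre_fit1 chrm N T) :
    fit1 chrm N T = fit1_alt chrm N T := by
  unfold fit1 fit1_alt
  simp only []
  rw [PySem.List.foldl_prod_mk
        (f := fun acc t =>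
          if (((PySem.List.pyRange 0 ((fit1Slot chrm.toList N t).length : Int) 1).map
                 (fun i => pyIntChar (PySem.List.pyGetD (fit1Slot chrm.toList N t) i ' '))).sum) > 1
          then acc + ((((PySem.List.pyRange 0 ((fit1Slot chrm.toList N t).length : Int) 1).map
                 (fun i => pyIntChar (PySem.List.pyGetD (fit1Slot chrm.toList N t) i ' '))).sum) - 1)
          else acc)
        (g := fun cc t => fit1Step chrm.toList N t cc)]
  have h1 := ov_eq chrm.toList N T
  have h2 := cons_eq chrm.toList N T (fun hN hT => (hpre.1 ⟨hN, hT⟩).1)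
  rw [h1, h2]

-- ===== VERDICT (by name: the statement is the Claim_ definition above) =====
theorem fit1_spec : Claim_equal_fit1 := by
  intro chrm N T _ hpre
  unfold Spec_fit1
  exact fit1_eq_alt chrm N T hpre
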